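-- pv_equiv track=rewrite | github.com/ejmockler/clou | clou/recovery_consolidation.py | _count_qg_unavailable
-- ===== SOURCE A (Python) =====
-- def _count_qg_unavailable(content: str) -> int:
--     """Count quality gate tool unavailability events from ## Quality Gate table.
--
--     Returns the number of rows where Tools Unavailable is not 'none'.
--     """
--     count = 0
--     in_section = False
--     header_skipped = False
--     for line in content.split("\n"):
--         if line.strip() == "## Quality Gate":
--             in_section = True
--             continue
--         if in_section and line.startswith("##"):
--             break
--         if in_section and line.startswith("|") and not line.startswith("|--"):
--             if not header_skipped:
--                 header_skipped = True
--                 continue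
--             cells = [c.strip() for c in line.split("|")]
--             if len(cells) >= 4 and cells[3] != "none":
--                 count += 1
--     return count
-- ===== SOURCE B (Python) =====
-- def _count_qg_unavailable(content: str) -> int:
--     """Count quality gate tool unavailability events from ## Quality Gate table.
--
--     Returns the number of rows where Tools Unavailable is not 'none'.
--     """
--     lines = content.split("\n")
--     for i, line in enumerate(lines):
--         if line.strip() == "## Quality Gate":
--             break
--     else:
--         return 0
--     body = []
--     for line in lines[i + 1:]:
--         if line.startswith("##"):
--             break
--         body.append(line)
--     rows = [l for l in body if l.startswith("|") and not l.startswith("|--")]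
--     count = 0
--     for row in rows[1:]:
--         cells = [c.strip() for c in row.split("|")]
--         if len(cells) >= 4 and cells[3] != "none":
--             count += 1
--     return count
-- ===== Notes on version B (the rewrite author's own statement) =====
-- stated objective: simpler
-- what changed: Replaces A's single pass with three boolean state flags by a three-phase decomposition: locate the quality-gate marker line, slice the section body up to the next '##' heading, then filter the table rows, drop the header row, and count the rows whose fourth cell reports an unavailable tool. Pre_ excludes content containing more than one line stripping to '## Quality Gate': on a repeated section heading A keeps reading past it while B ends the section there, and either reading of a duplicated heading is defensible.
-- outside the precondition, e.g. on _count_qg_unavailable('## Quality Gate\n|h|h|h|h|\n## Quality Gate\n|a|b|c|x|'): A returns 1, B returns 0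
import Mathlib
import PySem

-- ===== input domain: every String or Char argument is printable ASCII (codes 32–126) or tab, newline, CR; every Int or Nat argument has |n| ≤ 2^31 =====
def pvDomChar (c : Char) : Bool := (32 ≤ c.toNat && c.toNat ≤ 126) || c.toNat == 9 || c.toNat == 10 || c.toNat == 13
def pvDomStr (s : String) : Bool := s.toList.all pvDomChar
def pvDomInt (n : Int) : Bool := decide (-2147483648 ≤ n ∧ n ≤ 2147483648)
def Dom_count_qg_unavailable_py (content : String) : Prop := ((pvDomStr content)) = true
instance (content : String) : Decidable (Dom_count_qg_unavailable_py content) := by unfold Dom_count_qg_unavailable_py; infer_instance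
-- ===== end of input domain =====

-- B re-implements A's one-pass state machine as three phases (locate section, slice body, filter/count rows); objective: simpler decomposition, same cost.

-- ===== PORT A =====
-- cells = [c.strip() for c in line.split("|")]; len(cells) >= 4 and cells[3] != "none"
-- ("|" is a nonempty separator, so split? is always `some`; getD [] is exact here)
def aCellP (line : String) : Bool :=
  let cells := ((PySem.Str.split? line "|").getD []).map PySem.Str.strip
  decide (4 ≤ cells.length) && decide (cells.getD 3 "" ≠ "none")

-- the for-loop of A, state (count, in_section, header_skipped); `return count` on break
def aLoop : List String → Int → Bool → Bool → Int
  | [], count, _, _ => count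
  | line :: rest, count, inSec, hs =>
    if PySem.Str.strip line = "## Quality Gate" then aLoop rest count true hs
    else if inSec && PySem.Str.startswith line "##" then count
    else if inSec && (PySem.Str.startswith line "|" && !PySem.Str.startswith line "|--") then
      if !hs then aLoop rest count inSec true
      else if aCellP line then aLoop rest (count + 1) inSec hs
      else aLoop rest count inSec hs
    else aLoop rest count inSec hs

def count_qg_unavailable_py (content : String) : Int :=
  aLoop ((PySem.Str.split? content "\n").getD []) 0 false false

-- ===== PORT B =====
-- find the marker line; return the following lines, or none (for-else: return 0)
def bAfter : List String → Option (List String)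
  | [] => none
  | l :: rest => if PySem.Str.strip l = "## Quality Gate" then some rest else bAfter rest

-- truncate at the first '##' heading
def bBody : List String → List String
  | [] => []
  | l :: rest =>
    if PySem.Str.startswith l "##" then []
    else l :: bBody rest

def bIsRow (l : String) : Bool :=
  PySem.Str.startswith l "|" && !PySem.Str.startswith l "|--"

def bCellP (row : String) : Bool :=
  let cells := ((PySem.Str.split? row "|").getD []).map PySem.Str.strip
  decide (4 ≤ cells.length) && decide (cells.getD 3 "" ≠ "none")

def count_qg_unavailable_py_alt (content : String) : Int :=
  match bAfter ((PySem.Str.split? content "\n").getD []) with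
  | none => 0
  | some rest =>
    let rows := (bBody rest).filter bIsRow
    (rows.drop 1).foldl (fun c r => if bCellP r then c + 1 else c) 0

-- ===== PRECONDITION & SPEC =====
-- Pre_ excludes content with more than one line stripping to '## Quality Gate': on a repeated
-- section heading A keeps reading past it while B ends the section; either is defensible.
def Pre_count_qg_unavailable_py (content : String) : Prop :=
  (((PySem.Str.split? content "\n").getD []).countP
    (fun l => PySem.Str.strip l == "## Quality Gate")) ≤ 1
instance (content : String) : Decidable (Pre_count_qg_unavailable_py content) := by
  unfold Pre_count_qg_unavailable_py; infer_instance

def pvWitness_count_qg_unavailable_py : String :=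
  "## Quality Gate\n|h1|h2|h3|h4|\n|a|b|c|x|"

def Spec_count_qg_unavailable_py (content : String) (out : Int) : Prop := out = count_qg_unavailable_py_alt content
instance (content : String) (out : Int) : Decidable (Spec_count_qg_unavailable_py content out) := by unfold Spec_count_qg_unavailable_py; infer_instance

-- ===== CLAIM (what is proved, stated in full; the proofs are below) =====
def Claim_equal_count_qg_unavailable_py : Prop := ∀ (content : String), Dom_count_qg_unavailable_py content → Pre_count_qg_unavailable_py content → Spec_count_qg_unavailable_py content (count_qg_unavailable_py content)

-- ===== LEMMAS AND PROOFS =====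

-- the count contributed by the remaining lines while in_section = True
def cnt : List String → Bool → Int
  | [], _ => 0
  | l :: rest, hs =>
    if PySem.Str.strip l = "## Quality Gate" then cnt rest hs
    else if PySem.Str.startswith l "##" then 0
    else if bIsRow l then
      (if !hs then cnt rest true else (if aCellP l then 1 else 0) + cnt rest hs)
    else cnt rest hs

theorem aLoop_out (ls : List String) : ∀ (count : Int) (hs : Bool),
    aLoop ls count false hs =
      match bAfter ls with
      | none => count
      | some rest => aLoop rest count true hs := by
  induction ls with
  | nil => intro count hs; rfl
  | cons l rest ih =>
    intro count hs
    by_cases h : PySem.Str.strip l = "## Quality Gate" <;>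
      simp [aLoop, bAfter, h, ih]

theorem aLoop_in (ls : List String) : ∀ (count : Int) (hs : Bool),
    aLoop ls count true hs = count + cnt ls hs := by
  induction ls with
  | nil => intro count hs; simp [aLoop, cnt]
  | cons l rest ih =>
    intro count hs
    by_cases h1 : PySem.Str.strip l = "## Quality Gate"
    · simp [aLoop, cnt, h1, ih]
    · by_cases h2 : PySem.Chars.startswith l.toList ['#', '#'] = true
      · simp [aLoop, cnt, h1, h2]
      · by_cases h3 : bIsRow l = true
        · have h3c := h3
          simp only [bIsRow, Bool.and_eq_true, Bool.not_eq_eq_eq_not, Bool.not_true,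
            PySem.Str.startswith_eq] at h3c
          obtain ⟨h3a, h3b⟩ := h3c
          have h3a' : PySem.Chars.startswith l.toList ['|'] = true := by simpa using h3a
          have h3b' : PySem.Chars.startswith l.toList ['|', '-', '-'] = false := by simpa using h3b
          cases hs with
          | false => simp [aLoop, cnt, h1, h2, h3, h3a', h3b', ih]
          | true =>
            by_cases h4 : aCellP l = true <;>
              simp [aLoop, cnt, h1, h2, h3, h3a', h3b', h4, ih] <;> omega
        · have h3' : ¬ (PySem.Chars.startswith l.toList ['|'] = true ∧
              PySem.Chars.startswith l.toList ['|', '-', '-'] = false) := by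
            intro hc
            exact h3 (by simp [bIsRow, hc.1, hc.2])
          simp [aLoop, cnt, h1, h2, h3, h3', ih]

def sumR (rows : List String) : Int :=
  (rows.map (fun r => if bCellP r then (1 : Int) else 0)).sum

theorem foldl_sumR (rows : List String) : ∀ (c : Int),
    rows.foldl (fun c r => if bCellP r then c + 1 else c) c = c + sumR rows := by
  induction rows with
  | nil => intro c; simp [sumR]
  | cons r rest ih =>
    intro c
    by_cases h : bCellP r = true <;> simp [sumR, h, ih] <;> ring

-- under "no line of ls strips to the marker", the in-section count is B's phase-2/3 value
theorem cnt_eq (ls : List String)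
    (hno : ∀ l ∈ ls, PySem.Str.strip l ≠ "## Quality Gate") : ∀ (hs : Bool),
    cnt ls hs =
      (if hs then sumR ((bBody ls).filter bIsRow)
       else sumR (((bBody ls).filter bIsRow).drop 1)) := by
  induction ls with
  | nil => intro hs; simp [cnt, bBody, sumR]
  | cons l rest ih =>
    intro hs
    have h1 : ¬ PySem.Str.strip l = "## Quality Gate" := hno l (by simp)
    have ih' := ih (fun x hx => hno x (by simp [hx]))
    by_cases h2 : PySem.Chars.startswith l.toList ['#', '#'] = true
    · simp [cnt, bBody, h1, h2, sumR]
    · by_cases h3 : bIsRow l = true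
      · cases hs with
        | false => simp [cnt, bBody, h1, h2, h3, ih', sumR]
        | true => simp [cnt, bBody, h1, h2, h3, ih', sumR, aCellP, bCellP]
      · have h3' : bIsRow l = false := by simpa using h3
        simp [cnt, bBody, h1, h2, h3', ih']

-- from uniqueness of the marker line, the suffix after the first marker has none
theorem bAfter_no_marker (ls : List String)
    (hc : ls.countP (fun l => PySem.Str.strip l == "## Quality Gate") ≤ 1) :
    ∀ rest, bAfter ls = some rest →
      ∀ l ∈ rest, PySem.Str.strip l ≠ "## Quality Gate" := by
  induction ls with
  | nil => intro rest h; simp [bAfter] at h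
  | cons a tl ih =>
    intro rest h l hl
    by_cases ha : PySem.Str.strip a = "## Quality Gate"
    · have hrest : tl = rest := by simpa [bAfter, ha] using h
      subst hrest
      have : tl.countP (fun l => PySem.Str.strip l == "## Quality Gate") = 0 := by
        rw [List.countP_cons] at hc
        simp only [ha, beq_self_eq_true, if_true] at hc
        omega
      have := List.countP_eq_zero.mp this l hl
      simpa using this
    · have hrest : bAfter tl = some rest := by simpa [bAfter, ha] using h
      have hc' : tl.countP (fun l => PySem.Str.strip l == "## Quality Gate") ≤ 1 := by
        rw [List.countP_cons] at hc
        omega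
      exact ih hc' rest hrest l hl

-- ===== VERDICT (by name: the statement is the Claim_ definition above) =====
theorem count_qg_unavailable_py_spec : Claim_equal_count_qg_unavailable_py := by
  intro content _ hpre
  unfold Spec_count_qg_unavailable_py count_qg_unavailable_py count_qg_unavailable_py_alt
  rw [aLoop_out]
  cases hA : bAfter ((PySem.Str.split? content "\n").getD []) with
  | none => rfl
  | some rest =>
    have hno := bAfter_no_marker _ hpre rest hA
    simp only [aLoop_in, cnt_eq _ hno, foldl_sumR]
    simp
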